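-- pv_equiv track=rewrite | github.com/bibhs0401/rl-guided-feasibility-pump | generate_stalling_instances.py | circulant_graph
-- ===== SOURCE A (Python) =====
-- def circulant_graph(n: int, offsets: list[int]):
--     assert n >= 3, "n must be >= 3"
--     vertices = list(range(n))
--     edge_set = set()
--     for i in range(n):
--         for d in offsets:
--             j = (i + d) % n
--             if i != j:
--                 edge_set.add((min(i, j), max(i, j)))
--     return vertices, sorted(edge_set)
-- ===== SOURCE B (Python) =====
-- def circulant_graph(n: int, offsets: list[int]):
--     assert n >= 3, "n must be >= 3"
--     gaps = {min(d % n, n - d % n) for d in offsets if d % n != 0}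
--     vertices = list(range(n))
--     edges = []
--     for a in range(n):
--         bs = {a + g for g in gaps if a + g < n} | {a + n - g for g in gaps if a < g}
--         for b in sorted(bs):
--             edges.append((a, b))
--     return vertices, edges
-- ===== Notes on version B (the rewrite author's own statement) =====
-- stated objective: alternative
-- what changed: B first canonicalizes the offsets into the set of cycle gaps min(d%n, n-d%n), then walks the vertices once, deriving each vertex's larger neighbours directly from the gaps and emitting them in ascending order, so the edge list is produced already deduplicated and lexicographically sorted; A inserts a min/max pair into a set for every (vertex, offset) combination and sorts the whole set at the end.
import Mathlib
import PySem

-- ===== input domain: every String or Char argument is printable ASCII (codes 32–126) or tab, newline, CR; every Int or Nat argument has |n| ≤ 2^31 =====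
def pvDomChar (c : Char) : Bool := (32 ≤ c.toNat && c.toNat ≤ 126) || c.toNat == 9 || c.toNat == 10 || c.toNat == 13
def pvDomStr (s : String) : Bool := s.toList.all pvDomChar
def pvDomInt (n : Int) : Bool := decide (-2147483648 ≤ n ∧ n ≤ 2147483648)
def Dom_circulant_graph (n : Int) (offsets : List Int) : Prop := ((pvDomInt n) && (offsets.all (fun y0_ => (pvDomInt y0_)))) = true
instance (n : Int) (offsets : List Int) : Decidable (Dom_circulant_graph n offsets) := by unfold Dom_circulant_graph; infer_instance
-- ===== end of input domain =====

-- B replaces A's offset-driven set insertion + final sort by a direct lexicographic scan over all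
-- vertex pairs filtered by a precomputed set of canonical cycle gaps, so the output list is built
-- already sorted and deduplicated (objective: alternative decomposition, similar cost).

-- ===== PORT A =====
def circulant_graph (n : Int) (offsets : List Int) : List Int × (List (Int × Int)) :=
  let vertices := PySem.List.pyRange 0 n 1
  let edge_set : PySem.Set (Int × Int) :=
    (PySem.List.pyRange 0 n 1).foldl (fun s i =>
      offsets.foldl (fun s d =>
        let j := PySem.Int.mod (i + d) n
        if i ≠ j then PySem.Set.add s (min i j, max i j) else s) s) []
  (vertices, PySem.List.sorted2 edge_set Prod.fst Prod.snd)

-- ===== PORT B =====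
def circulant_graph_alt (n : Int) (offsets : List Int) : List Int × (List (Int × Int)) :=
  let gaps : PySem.Set Int :=
    PySem.Set.ofList ((offsets.filter (fun d => decide (PySem.Int.mod d n ≠ 0))).map
      (fun d => min (PySem.Int.mod d n) (n - PySem.Int.mod d n)))
  let vertices := PySem.List.pyRange 0 n 1
  let edges : List (Int × Int) :=
    (PySem.List.pyRange 0 n 1).foldl (fun acc a =>
      let bs : PySem.Set Int :=
        PySem.Set.union
          (PySem.Set.ofList ((gaps.filter (fun g => decide (a + g < n))).map (fun g => a + g)))
          (PySem.Set.ofList ((gaps.filter (fun g => decide (a < g))).map (fun g => a + n - g)))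
      (PySem.List.sorted bs (fun x => x) false).foldl (fun acc b => acc ++ [(a, b)]) acc) []
  (vertices, edges)

-- ===== PRECONDITION & SPEC =====
-- A's `assert n >= 3` raises AssertionError for n < 3; Pre_ admits exactly the inputs A returns on.
def Pre_circulant_graph (n : Int) (offsets : List Int) : Prop := 3 ≤ n
instance (n : Int) (offsets : List Int) : Decidable (Pre_circulant_graph n offsets) := by unfold Pre_circulant_graph; infer_instance
def pvWitness_circulant_graph : Int × List Int := (4, [1])

def Spec_circulant_graph (n : Int) (offsets : List Int) (out : List Int × (List (Int × Int))) : Prop := out = circulant_graph_alt n offsets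
instance (n : Int) (offsets : List Int) (out : List Int × (List (Int × Int))) : Decidable (Spec_circulant_graph n offsets out) := by unfold Spec_circulant_graph; infer_instance

-- ===== CLAIM (what is proved, stated in full; the proofs are below) =====
def Claim_equal_circulant_graph : Prop := ∀ (n : Int) (offsets : List Int), Dom_circulant_graph n offsets → Pre_circulant_graph n offsets → Spec_circulant_graph n offsets (circulant_graph n offsets)

-- ===== LEMMAS AND PROOFS =====

-- The Bool comparator `sorted2` uses for key (Prod.fst, Prod.snd): Python's lexicographic `<` on pairs.
def pvLt (p q : Int × Int) : Bool :=
  decide (p.1 < q.1) || (!decide (q.1 < p.1) && decide (p.2 < q.2))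

theorem pvLt_iff (p q : Int × Int) : pvLt p q = true ↔ (p.1 < q.1 ∨ (p.1 = q.1 ∧ p.2 < q.2)) := by
  simp [pvLt]; omega

theorem sorted2_eq_foldl (xs : List (Int × Int)) :
    PySem.List.sorted2 xs Prod.fst Prod.snd false
      = xs.foldl (fun acc x => PySem.List.insertBy pvLt x acc) [] := rfl

theorem pairwise_insertBy (x : Int × Int) (acc : List (Int × Int))
    (h : acc.Pairwise (fun a b => pvLt b a = false)) :
    (PySem.List.insertBy pvLt x acc).Pairwise (fun a b => pvLt b a = false) := by
  induction acc with
  | nil => simp [PySem.List.insertBy]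
  | cons y ys ih =>
    rw [List.pairwise_cons] at h
    obtain ⟨hy, hys⟩ := h
    by_cases hxy : pvLt x y = true
    · simp only [PySem.List.insertBy, hxy]
      refine List.pairwise_cons.2 ⟨?_, List.pairwise_cons.2 ⟨hy, hys⟩⟩
      intro z hz
      rcases List.mem_cons.1 hz with hz | hz
      · rw [pvLt_iff] at hxy
        subst hz
        by_contra hcon
        rw [Bool.not_eq_false, pvLt_iff] at hcon
        omega
      · have hyz := hy z hz
        rw [pvLt_iff] at hxy
        by_contra hcon
        rw [Bool.not_eq_false, pvLt_iff] at hcon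
        have : ¬ pvLt z y = true := by rw [hyz]; simp
        rw [pvLt_iff] at this
        omega
    · simp only [PySem.List.insertBy, hxy]
      refine List.pairwise_cons.2 ⟨?_, ih hys⟩
      intro z hz
      rw [PySem.List.mem_insertBy] at hz
      rcases hz with hz | hz'
      · subst hz
        simpa using hxy
      · exact hy z hz'

theorem sorted2_pairwise_le (xs : List (Int × Int)) :
    (PySem.List.sorted2 xs Prod.fst Prod.snd false).Pairwise (fun a b => pvLt b a = false) := by
  rw [sorted2_eq_foldl]
  suffices h : ∀ acc, acc.Pairwise (fun a b => pvLt b a = false) →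
      (xs.foldl (fun acc x => PySem.List.insertBy pvLt x acc) acc).Pairwise
        (fun a b => pvLt b a = false) by
    exact h [] (by simp)
  induction xs with
  | nil => intro acc hacc; simpa using hacc
  | cons x t ih => intro acc hacc; exact ih _ (pairwise_insertBy x acc hacc)

-- sorted2 by (fst, snd) of any list xs equals any strictly-lex-increasing rearrangement of xs.
theorem sorted2_eq_of_perm_of_pairwise (xs ys : List (Int × Int)) (hperm : ys.Perm xs)
    (hys : ys.Pairwise (fun a b => pvLt a b = true)) :
    PySem.List.sorted2 xs Prod.fst Prod.snd false = ys := by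
  refine List.eq_of_perm_of_sorted (le := fun a b => pvLt b a = false) ?_ ?_ ?_ ?_
  · intro a b _ _ h1 h2
    have ha : ¬ pvLt b a = true := by simp [h1]
    have hb : ¬ pvLt a b = true := by simp [h2]
    rw [pvLt_iff] at ha hb
    obtain ⟨a1, a2⟩ := a
    obtain ⟨b1, b2⟩ := b
    dsimp only at ha hb
    rw [Prod.mk.injEq]
    constructor <;> omega
  · exact sorted2_pairwise_le xs
  · refine hys.imp ?_
    intro a b h
    rw [pvLt_iff] at h
    by_contra hc
    rw [Bool.not_eq_false, pvLt_iff] at hc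
    omega
  · exact (PySem.List.sorted2_perm xs Prod.fst Prod.snd false).trans hperm.symm

-- A's nested loops build exactly set(bigList): fold of Set.update is Set.ofList of the flatMap.
theorem foldl_update_eq_update_flatMap (l : List Int) (L : Int → List (Int × Int))
    (s : PySem.Set (Int × Int)) :
    l.foldl (fun s i => PySem.Set.update s (L i)) s = PySem.Set.update s (l.flatMap L) := by
  induction l generalizing s with
  | nil => simp [PySem.Set.update]
  | cons a t ih =>
    rw [List.foldl_cons, ih, List.flatMap_cons]
    simp [PySem.Set.update, List.foldl_append]

theorem edge_set_eq_ofList (n : Int) (offsets : List Int) :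
    ((PySem.List.pyRange 0 n 1).foldl (fun s i =>
        offsets.foldl (fun s d =>
          let j := PySem.Int.mod (i + d) n
          if i ≠ j then PySem.Set.add s (min i j, max i j) else s) s) [])
    = PySem.Set.ofList ((PySem.List.pyRange 0 n 1).flatMap (fun i =>
        (offsets.filter (fun d => decide (i ≠ PySem.Int.mod (i + d) n))).map
          (fun d => (min i (PySem.Int.mod (i + d) n), max i (PySem.Int.mod (i + d) n))))) := by
  have hin : ∀ (i : Int) (s : PySem.Set (Int × Int)),
      offsets.foldl (fun s d =>
        let j := PySem.Int.mod (i + d) n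
        if i ≠ j then PySem.Set.add s (min i j, max i j) else s) s
      = PySem.Set.update s ((offsets.filter (fun d => decide (i ≠ PySem.Int.mod (i + d) n))).map
          (fun d => (min i (PySem.Int.mod (i + d) n), max i (PySem.Int.mod (i + d) n)))) := by
    intro i s
    rw [PySem.Set.update_map_eq_foldl_add,
      ← PySem.List.foldl_ite_eq_foldl_filter (fun d => i ≠ PySem.Int.mod (i + d) n)
        (fun s d => PySem.Set.add s (min i (PySem.Int.mod (i + d) n), max i (PySem.Int.mod (i + d) n)))]
  calc ((PySem.List.pyRange 0 n 1).foldl (fun s i =>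
        offsets.foldl (fun s d =>
          let j := PySem.Int.mod (i + d) n
          if i ≠ j then PySem.Set.add s (min i j, max i j) else s) s) [])
      = (PySem.List.pyRange 0 n 1).foldl (fun s i =>
          PySem.Set.update s ((offsets.filter (fun d => decide (i ≠ PySem.Int.mod (i + d) n))).map
            (fun d => (min i (PySem.Int.mod (i + d) n), max i (PySem.Int.mod (i + d) n))))) [] := by
        exact PySem.List.foldl_congr_mem _ _ _ _ (fun acc x _ => hin x acc)
    _ = _ := by
        rw [foldl_update_eq_update_flatMap]
        rfl

-- residues: (i + d) % n for 0 ≤ i < n splits on whether i + (d % n) wraps past n.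
theorem modshift (n i d : Int) (hn : 0 < n) (hi : 0 ≤ i) (hi2 : i < n) :
    (i + d) % n = if i + d % n < n then i + d % n else i + d % n - n := by
  have hr0 : 0 ≤ d % n := Int.emod_nonneg d (by omega)
  have hr1 : d % n < n := Int.emod_lt_of_pos d hn
  have h1 : (i + d) % n = (i + d % n) % n := by
    conv_lhs => rw [Int.add_emod, Int.emod_eq_of_lt hi hi2]
  rw [h1]
  split
  · exact Int.emod_eq_of_lt (by omega) (by omega)
  · have h2 : (i + d % n) % n = (i + d % n - n) % n := by
      conv_lhs => rw [show i + d % n = (i + d % n - n) + n * 1 from by ring,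
        Int.add_mul_emod_self_left]
    rw [h2]
    exact Int.emod_eq_of_lt (by omega) (by omega)

-- the heart: A's {min,max}-edges from offsets = B's per-vertex gap-derived neighbours.
theorem mem_equiv (n : Int) (offsets : List Int) (hn : 0 < n) (x : Int × Int) :
    (∃ i, (0 ≤ i ∧ i < n) ∧ ∃ d ∈ offsets, i ≠ (i + d) % n ∧
        x = (min i ((i + d) % n), max i ((i + d) % n)))
    ↔ (∃ a, (0 ≤ a ∧ a < n) ∧ ∃ b,
        ((∃ g, (∃ d ∈ offsets, d % n ≠ 0 ∧ g = min (d % n) (n - d % n)) ∧ a + g < n ∧ b = a + g) ∨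
         (∃ g, (∃ d ∈ offsets, d % n ≠ 0 ∧ g = min (d % n) (n - d % n)) ∧ a < g ∧ b = a + n - g)) ∧
        x = (a, b)) := by
  constructor
  · rintro ⟨i, ⟨hi0, hi1⟩, d, hd, hne, hx⟩
    have hms := modshift n i d hn hi0 hi1
    have hr0 : 0 ≤ d % n := Int.emod_nonneg d (by omega)
    have hr1 : d % n < n := Int.emod_lt_of_pos d hn
    have hrne : d % n ≠ 0 := by
      intro h0; apply hne; rw [hms, h0]; simp; omega
    by_cases hc : i + d % n < n
    · rw [hms, if_pos hc] at hx
      refine ⟨i, ⟨hi0, hi1⟩, i + d % n, ?_, ?_⟩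
      · by_cases hrr : d % n ≤ n - d % n
        · exact Or.inl ⟨min (d % n) (n - d % n), ⟨d, hd, hrne, rfl⟩, by omega, by omega⟩
        · exact Or.inr ⟨min (d % n) (n - d % n), ⟨d, hd, hrne, rfl⟩, by omega, by omega⟩
      · rw [hx, min_eq_left (by omega), max_eq_right (by omega)]
    · rw [hms, if_neg hc] at hx
      have hne' : i + d % n - n ≠ i := by rw [hms, if_neg hc] at hne; omega
      refine ⟨i + d % n - n, ⟨by omega, by omega⟩, i, ?_, ?_⟩
      · by_cases hrr : n - d % n ≤ d % n
        · exact Or.inl ⟨min (d % n) (n - d % n), ⟨d, hd, hrne, rfl⟩, by omega, by omega⟩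
        · exact Or.inr ⟨min (d % n) (n - d % n), ⟨d, hd, hrne, rfl⟩, by omega, by omega⟩
      · rw [hx, min_eq_right (by omega), max_eq_left (by omega)]
  · rintro ⟨a, ⟨ha0, ha1⟩, b, hdisj, hx⟩
    rcases hdisj with ⟨g, ⟨d, hd, hrne, hg⟩, h1, h2⟩ | ⟨g, ⟨d, hd, hrne, hg⟩, h1, h2⟩ <;>
      have hr0 : 0 ≤ d % n := Int.emod_nonneg d (by omega) <;>
      have hr1 : d % n < n := Int.emod_lt_of_pos d hn <;>
      have hcases : g = d % n ∨ g = n - d % n := by omega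
    · -- b = a + g, a + g < n
      rcases hcases with hgr | hgr
      · refine ⟨a, ⟨ha0, ha1⟩, d, hd, ?_, ?_⟩ <;>
          rw [modshift n a d hn ha0 ha1, if_pos (by omega)]
        · omega
        · rw [hx, min_eq_left (by omega), max_eq_right (by omega), Prod.mk.injEq]
          exact ⟨rfl, by omega⟩
      · refine ⟨b, ⟨by omega, by omega⟩, d, hd, ?_, ?_⟩ <;>
          rw [modshift n b d hn (by omega) (by omega), if_neg (by omega)]
        · omega
        · rw [hx, min_eq_right (by omega), max_eq_left (by omega), Prod.mk.injEq]
          exact ⟨by omega, rfl⟩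
    · -- b = a + n - g, a < g
      rcases hcases with hgr | hgr
      · refine ⟨b, ⟨by omega, by omega⟩, d, hd, ?_, ?_⟩ <;>
          rw [modshift n b d hn (by omega) (by omega), if_neg (by omega)]
        · omega
        · rw [hx, min_eq_right (by omega), max_eq_left (by omega), Prod.mk.injEq]
          exact ⟨by omega, rfl⟩
      · refine ⟨a, ⟨ha0, ha1⟩, d, hd, ?_, ?_⟩ <;>
          rw [modshift n a d hn ha0 ha1, if_pos (by omega)]
        · omega
        · rw [hx, min_eq_left (by omega), max_eq_right (by omega), Prod.mk.injEq]
          exact ⟨rfl, by omega⟩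

-- B's edge loop, as a flatMap of per-vertex sorted neighbour lists.
theorem edgesB_eq (n : Int) (bs : Int → PySem.Set Int) :
    (PySem.List.pyRange 0 n 1).foldl (fun acc a =>
      (PySem.List.sorted (bs a) (fun x => x) false).foldl (fun acc b => acc ++ [(a, b)]) acc) []
    = (PySem.List.pyRange 0 n 1).flatMap (fun a =>
        (PySem.List.sorted (bs a) (fun x => x) false).map (fun b => (a, b))) := by
  have h := PySem.List.foldl_congr_mem (PySem.List.pyRange 0 n 1)
    (fun acc a => (PySem.List.sorted (bs a) (fun x => x) false).foldl
      (fun acc b => acc ++ [(a, b)]) acc)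
    (fun acc a => acc ++ (PySem.List.sorted (bs a) (fun x => x) false).map (fun b => (a, b)))
    ([] : List (Int × Int))
    (fun acc a _ => PySem.List.foldl_append_singleton_eq_map _ _ _)
  rw [h, PySem.List.foldl_append_eq_flatMap]
  rfl

theorem sorted_nodup_pairwise_lt (xs : PySem.Set Int) (hx : xs.Nodup) :
    (PySem.List.sorted xs (fun x => x) false).Pairwise (· < ·) := by
  have hle := PySem.List.sorted_pairwise xs (fun x => x)
  have hnd : (PySem.List.sorted xs (fun x => x) false).Nodup :=
    (PySem.List.sorted_perm xs (fun x => x) false).symm.nodup hx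
  exact (hle.and hnd).imp (fun h => lt_of_le_of_ne h.1 h.2)

theorem bigB_pairwise (n : Int) (bs : Int → PySem.Set Int) (hbs : ∀ a, (bs a).Nodup) :
    ((PySem.List.pyRange 0 n 1).flatMap (fun a =>
      (PySem.List.sorted (bs a) (fun x => x) false).map
        (fun b => (a, b)))).Pairwise (fun p q => pvLt p q = true) := by
  rw [List.pairwise_flatMap]
  constructor
  · intro a _
    refine List.Pairwise.map _ ?_ (sorted_nodup_pairwise_lt (bs a) (hbs a))
    intro b c hbc
    rw [pvLt_iff]; right; exact ⟨rfl, hbc⟩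
  · refine (PySem.List.pairwise_lt_pyRange_one 0 n).imp ?_
    intro a1 a2 h12 x hx y hy
    simp only [List.mem_map] at hx hy
    obtain ⟨b1, _, hx1⟩ := hx
    obtain ⟨b2, _, hy1⟩ := hy
    rw [← hx1, ← hy1, pvLt_iff]
    left; exact h12

-- ===== VERDICT (by name: the statement is the Claim_ definition above) =====
theorem circulant_graph_spec : Claim_equal_circulant_graph := by
  intro n offsets _ hpre
  unfold Pre_circulant_graph at hpre
  unfold Spec_circulant_graph circulant_graph circulant_graph_alt
  have hn : 0 < n := by omega
  refine Prod.ext rfl ?_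
  simp only
  rw [edge_set_eq_ofList, edgesB_eq]
  have hbs : ∀ a : Int,
      (PySem.Set.union
        (PySem.Set.ofList (((PySem.Set.ofList ((offsets.filter
            (fun d => decide (PySem.Int.mod d n ≠ 0))).map
            (fun d => min (PySem.Int.mod d n) (n - PySem.Int.mod d n)))).filter
              (fun g => decide (a + g < n))).map (fun g => a + g)))
        (PySem.Set.ofList (((PySem.Set.ofList ((offsets.filter
            (fun d => decide (PySem.Int.mod d n ≠ 0))).map
            (fun d => min (PySem.Int.mod d n) (n - PySem.Int.mod d n)))).filter
              (fun g => decide (a < g))).map (fun g => a + n - g)))).Nodup :=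
    fun a => PySem.Set.nodup_union _ _ (PySem.Set.nodup_ofList _)
  refine sorted2_eq_of_perm_of_pairwise _ _ ?_ (bigB_pairwise n _ hbs)
  have hB := bigB_pairwise n _ hbs
  have hBnodup := List.Pairwise.imp
    (S := fun p q : Int × Int => p ≠ q)
    (fun {p q} h => by rw [pvLt_iff] at h; intro he; rw [he] at h; omega) hB
  rw [List.perm_ext_iff_of_nodup hBnodup (PySem.Set.nodup_ofList _)]
  intro p
  rw [PySem.Set.mem_ofList]
  have hmod : ∀ a : Int, PySem.Int.mod a n = a % n := fun a => PySem.Int.mod_eq_emod_of_pos hn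
  constructor
  · intro hp
    simp only [List.mem_flatMap, List.mem_map, List.mem_filter, PySem.List.mem_sorted,
      PySem.Set.mem_union, PySem.Set.mem_ofList, PySem.List.mem_pyRange_one,
      decide_eq_true_eq, hmod] at hp
    obtain ⟨a, ⟨ha0, ha1⟩, b, hb, hx⟩ := hp
    have hform : ∃ a, (0 ≤ a ∧ a < n) ∧ ∃ b,
        ((∃ g, (∃ d ∈ offsets, d % n ≠ 0 ∧ g = min (d % n) (n - d % n)) ∧ a + g < n ∧ b = a + g) ∨
         (∃ g, (∃ d ∈ offsets, d % n ≠ 0 ∧ g = min (d % n) (n - d % n)) ∧ a < g ∧ b = a + n - g)) ∧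
        p = (a, b) := by
      refine ⟨a, ⟨ha0, ha1⟩, b, ?_, hx.symm⟩
      rcases hb with ⟨g, ⟨⟨d, ⟨hd, hdr⟩, hgd⟩, hgc⟩, hgb⟩ | ⟨g, ⟨⟨d, ⟨hd, hdr⟩, hgd⟩, hgc⟩, hgb⟩
      · exact Or.inl ⟨g, ⟨d, hd, hdr, hgd.symm⟩, hgc, hgb.symm⟩
      · exact Or.inr ⟨g, ⟨d, hd, hdr, hgd.symm⟩, hgc, hgb.symm⟩
    obtain ⟨i, hi, d, hd, hne, hxe⟩ := (mem_equiv n offsets hn p).2 hform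
    simp only [List.mem_flatMap, List.mem_map, List.mem_filter,
      PySem.List.mem_pyRange_one, decide_eq_true_eq, hmod]
    exact ⟨i, ⟨by omega, hi.2⟩, d, ⟨hd, hne⟩, hxe.symm⟩
  · intro hp
    simp only [List.mem_flatMap, List.mem_map, List.mem_filter,
      PySem.List.mem_pyRange_one, decide_eq_true_eq, hmod] at hp
    obtain ⟨i, ⟨hi0, hi1⟩, d, ⟨hd, hne⟩, hxe⟩ := hp
    obtain ⟨a, ha, b, hdisj, hx'⟩ :=
      (mem_equiv n offsets hn p).1 ⟨i, ⟨hi0, hi1⟩, d, hd, hne, hxe.symm⟩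
    simp only [List.mem_flatMap, List.mem_map, List.mem_filter, PySem.List.mem_sorted,
      PySem.Set.mem_union, PySem.Set.mem_ofList, PySem.List.mem_pyRange_one,
      decide_eq_true_eq, hmod]
    refine ⟨a, ⟨ha.1, ha.2⟩, b, ?_, hx'.symm⟩
    rcases hdisj with ⟨g, ⟨d', hd', hdr', hgd'⟩, hgc, hgb⟩ | ⟨g, ⟨d', hd', hdr', hgd'⟩, hgc, hgb⟩
    · exact Or.inl ⟨g, ⟨⟨d', ⟨hd', hdr'⟩, hgd'.symm⟩, hgc⟩, hgb.symm⟩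
    · exact Or.inr ⟨g, ⟨⟨d', ⟨hd', hdr'⟩, hgd'.symm⟩, hgc⟩, hgb.symm⟩
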